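-- pv_equiv track=rewrite | github.com/phatakshaunak/scaler_academy | DSA_Problem_Solving/Queues/perfect_numbers.py | solve
-- ===== SOURCE A (Python) =====
-- from collections import deque
--
-- def solve(A):
--
--     q = deque(['1', '2'])
--
--     num = 0
--
--     # Generate first halves of palindrome until num reaches A.
--     while num != A:
--
--         x = q.popleft()
--
--         q.append(x + '1')
--         q.append(x + '2')
--         num += 1
--
--     ans = x
--
--     # Concatenate reverse of ans to return Ath palindrome perfect number
--     for i in range(len(x) - 1, -1, -1):
--         ans = ans + x[i]
--
--     return ans
-- ===== SOURCE B (Python) =====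
-- def solve(A):
--     # Half of the palindrome is A written in bijective base 2 (digits 1 and 2); mirror it.
--     s = ''
--     n = A
--     while n > 0:
--         d = 2 if n % 2 == 0 else 1
--         s = str(d) + s
--         n = (n - d) // 2
--     return s + s[::-1]
-- ===== Notes on version B (the rewrite author's own statement) =====
-- stated objective: faster
-- what changed: B computes the first half directly as the bijective base-2 numeral of A (digits 1/2, built low-order-digit first) and mirrors it, instead of A's BFS that generates and enqueues all A first halves.
-- outside the precondition, e.g. on solve(0): A raises UnboundLocalError, B returns ''
import Mathlib
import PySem

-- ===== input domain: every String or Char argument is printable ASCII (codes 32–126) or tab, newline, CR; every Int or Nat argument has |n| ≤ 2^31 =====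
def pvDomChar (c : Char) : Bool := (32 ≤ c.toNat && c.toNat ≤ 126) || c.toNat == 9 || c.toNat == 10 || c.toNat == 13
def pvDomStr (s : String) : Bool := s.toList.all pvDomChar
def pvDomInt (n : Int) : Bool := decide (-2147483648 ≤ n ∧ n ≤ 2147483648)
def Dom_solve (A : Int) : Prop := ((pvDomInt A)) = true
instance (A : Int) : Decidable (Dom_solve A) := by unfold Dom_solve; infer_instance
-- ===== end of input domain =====

-- B replaces A's breadth-first generation of all first halves by computing the A-th half
-- directly as A's bijective base-2 numeral (digits 1/2) and mirroring it (objective: faster).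

-- ===== PORT A =====
-- the BFS while-loop: pop x from the deque, push x+'1' and x+'2', count up to A
-- (strings as List Char; the deque as the standard two-list functional queue:
--  popleft takes from `front`, refilling it from `back.reverse`; append conses onto `back`)
def solveLoopA (A : Int) (front back : List (List Char)) (num : Int) (x : List Char) : List Char :=
  if num = A then x
  else
    if _h : num < A then
      match front, back.reverse with
      | [], [] => x  -- unreachable: the deque always holds num+2 elements
      | [], y :: rest => solveLoopA A rest [y ++ ['2'], y ++ ['1']] (num + 1) y
      | y :: rest, _ => solveLoopA A rest ((y ++ ['2']) :: (y ++ ['1']) :: back) (num + 1) y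
    else x  -- Python loops forever when num overshoots A (A < 0); totality guard, outside Pre_
termination_by (A - num).toNat
decreasing_by all_goals omega

def solve (A : Int) : String :=
  let x := solveLoopA A [['1'], ['2']] [] 0 []  -- x unbound in Python when A = 0 (excluded by Pre_)
  -- for i in range(len(x)-1, -1, -1): ans = ans + x[i]
  let ans := (PySem.List.pyRange ((x.length : Int) - 1) (-1) (-1)).foldl
      (fun ans i => ans ++ ((PySem.List.pyGet? x i).map (fun c => [c])).getD []) x
  String.ofList ans

-- ===== PORT B =====
-- while n > 0: prepend '2' if n even else '1'; n = (n - d) // 2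
def solveLoopB (n : Int) (s : List Char) : List Char :=
  if 0 < n then
    let d : Int := if PySem.Int.mod n 2 = 0 then 2 else 1
    solveLoopB (PySem.Int.floordiv (n - d) 2) (PySem.Int.toChars d ++ s)
  else s
termination_by n.toNat
decreasing_by
  rw [PySem.Int.floordiv_eq_ediv_of_pos (by omega)]
  split_ifs at * <;> omega

def solve_alt (A : Int) : String :=
  let s := solveLoopB A []
  String.ofList (s ++ s.reverse)  -- s + s[::-1]

-- ===== PRECONDITION & SPEC =====
-- Pre_ excludes A ≤ 0: at A = 0 Python A raises UnboundLocalError (x never assigned),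
-- and for A < 0 its while-loop never terminates.
def Pre_solve (A : Int) : Prop := 1 ≤ A
instance (A : Int) : Decidable (Pre_solve A) := by unfold Pre_solve; infer_instance
def pvWitness_solve : Int := (5)

def Spec_solve (A : Int) (out : String) : Prop := out = solve_alt A
instance (A : Int) (out : String) : Decidable (Spec_solve A out) := by unfold Spec_solve; infer_instance

-- ===== CLAIM (what is proved, stated in full; the proofs are below) =====
def Claim_equal_solve : Prop := ∀ (A : Int), Dom_solve A → Pre_solve A → Spec_solve A (solve A)

-- ===== LEMMAS AND PROOFS =====

-- the k-th generated half: k written in bijective base 2 over digits '1','2'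
def hchars (k : Nat) : List Char :=
  if k = 0 then []
  else if k % 2 = 1 then hchars ((k - 1) / 2) ++ ['1']
  else hchars ((k - 2) / 2) ++ ['2']
termination_by k
decreasing_by all_goals omega

lemma hchars_odd (m : Nat) : hchars (2 * m + 1) = hchars m ++ ['1'] := by
  rw [hchars]
  have h1 : (2 * m + 1) % 2 = 1 := by omega
  have h2 : (2 * m + 1 - 1) / 2 = m := by omega
  rw [h2]
  simp [h1]

lemma hchars_even (m : Nat) : hchars (2 * m + 2) = hchars m ++ ['2'] := by
  rw [hchars]
  have h1 : (2 * m + 2) % 2 = 0 := by omega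
  have h2 : (2 * m + 2 - 2) / 2 = m := by omega
  rw [h2]
  simp [h1]

lemma hchars_one : hchars 1 = ['1'] := by
  have := hchars_odd 0
  rw [show hchars 0 = [] from by rw [hchars]; simp] at this
  simpa using this

lemma hchars_two : hchars 2 = ['2'] := by
  have := hchars_even 0
  rw [show hchars 0 = [] from by rw [hchars]; simp] at this
  simpa using this

-- BFS invariant: after m pops the deque holds halves m+1 … 2m+2, in order
lemma loopA_eq (A : Int) : ∀ (r m : Nat) (front back : List (List Char)) (x : List Char),
    (m : Int) + r = A →
    front ++ back.reverse = (List.range' (m + 1) (m + 2)).map hchars →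
    solveLoopA A front back m x = if r = 0 then x else hchars (m + r) := by
  intro r
  induction r with
  | zero =>
    intro m front back x hm _
    rw [solveLoopA.eq_def]
    have : (m : Int) = A := by omega
    simp [this]
  | succ r ih =>
    intro m front back x hm hfb
    have hne : (m : Int) ≠ A := by omega
    have hlt : (m : Int) < A := by omega
    have hra : List.range' (m + 2) (m + 1) ++ [2 * m + 3, 2 * m + 4] = List.range' (m + 2) (m + 3) := by
      have h := List.range'_append (s := m + 2) (m := m + 1) (n := 2) (step := 1)
      have h2 : List.range' (m + 2 + 1 * (m + 1)) 2 = [2 * m + 3, 2 * m + 4] := by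
        simp [List.range']
        omega
      rw [h2] at h
      rw [h]
    have hq : ((List.range' (m + 2) (m + 1)).map hchars) ++ [hchars (m + 1) ++ ['1'], hchars (m + 1) ++ ['2']]
        = (List.range' (m + 2) (m + 3)).map hchars := by
      rw [show hchars (m + 1) ++ ['1'] = hchars (2 * m + 3) from by rw [show 2 * m + 3 = 2 * (m + 1) + 1 from by ring, hchars_odd]]
      rw [show hchars (m + 1) ++ ['2'] = hchars (2 * m + 4) from by rw [show 2 * m + 4 = 2 * (m + 1) + 2 from by ring, hchars_even]]
      rw [← hra]
      simp
    have hcast : (m : Int) + 1 = ((m + 1 : Nat) : Int) := by push_cast; ring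
    have hm' : ((m + 1 : Nat) : Int) + (r : Int) = A := by push_cast; push_cast at hm; omega
    have step : ∀ (front' back' : List (List Char)),
        front' ++ back'.reverse = (List.range' (m + 1 + 1) (m + 1 + 2)).map hchars →
        solveLoopA A front' back' ((m : Int) + 1) (hchars (m + 1)) = if r + 1 = 0 then x else hchars (m + (r + 1)) := by
      intro front' back' hfb'
      rw [hcast, ih (m + 1) front' back' (hchars (m + 1)) hm' hfb']
      by_cases hr : r = 0
      · simp [hr]
      · simp only [hr, Nat.succ_ne_zero, if_false]
        congr 1
        omega
    rw [List.range'_succ, List.map_cons] at hfb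
    rw [solveLoopA.eq_def, if_neg hne]
    cases front with
    | nil =>
      simp only [List.nil_append] at hfb
      rw [dif_pos hlt, hfb]
      dsimp only
      apply step
      simp only [List.reverse_cons, List.reverse_nil, List.nil_append]
      rw [show ([hchars (m + 1) ++ ['1'], hchars (m + 1) ++ ['2']] : List (List Char))
            = [hchars (m + 1) ++ ['1']] ++ [hchars (m + 1) ++ ['2']] from rfl] at hq
      simpa using hq
    | cons y rest =>
      rw [dif_pos hlt]
      dsimp only
      simp only [List.cons_append, List.cons.injEq] at hfb
      obtain ⟨hy, htail⟩ := hfb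
      subst hy
      apply step
      simp only [List.reverse_cons, List.append_assoc]
      rw [← List.append_assoc rest, htail]
      simpa using hq

lemma loopB_eq : ∀ (n : Nat), ∀ (s : List Char), solveLoopB (n : Int) s = hchars n ++ s := by
  intro n
  induction n using Nat.strong_induction_on with
  | _ n ih =>
    intro s
    rw [solveLoopB.eq_def]
    by_cases h0 : n = 0
    · subst h0
      rw [hchars]
      simp
    · have hpos : (0 : Int) < (n : Int) := by omega
      rw [if_pos hpos]
      have hm : PySem.Int.mod (n : Int) 2 = ((n % 2 : Nat) : Int) := by
        exact_mod_cast PySem.Int.mod_natCast n 2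
      rw [hm]
      by_cases hp : n % 2 = 0
      · have hn2 : 2 ≤ n := by omega
        have hd : (((n % 2 : Nat) : Int) = 0) := by rw [hp]; rfl
        rw [if_pos hd]
        dsimp only
        have hc : (n : Int) - 2 = ((n - 2 : Nat) : Int) := by omega
        rw [hc]
        rw [show PySem.Int.floordiv ((n - 2 : Nat) : Int) 2 = (((n - 2) / 2 : Nat) : Int) from by
          exact_mod_cast PySem.Int.floordiv_natCast (n - 2) 2]
        rw [ih ((n - 2) / 2) (by omega)]
        rw [show hchars n = hchars ((n - 2) / 2) ++ ['2'] from by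
          rw [hchars]
          have h1 : ¬ n % 2 = 1 := by omega
          simp [h0, h1]]
        rw [show PySem.Int.toChars 2 = ['2'] from by decide]
        simp
      · have hp1 : n % 2 = 1 := by omega
        have hd : ¬ (((n % 2 : Nat) : Int) = 0) := by rw [hp1]; decide
        rw [if_neg hd]
        dsimp only
        have hc : (n : Int) - 1 = ((n - 1 : Nat) : Int) := by omega
        rw [hc]
        rw [show PySem.Int.floordiv ((n - 1 : Nat) : Int) 2 = (((n - 1) / 2 : Nat) : Int) from by
          exact_mod_cast PySem.Int.floordiv_natCast (n - 1) 2]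
        rw [ih ((n - 1) / 2) (by omega)]
        rw [show hchars n = hchars ((n - 1) / 2) ++ ['1'] from by
          rw [hchars]
          simp [h0, hp1]]
        rw [show PySem.Int.toChars 1 = ['1'] from by decide]
        simp

lemma pyRange_down_cons (a : Int) (h : 0 ≤ a) :
    PySem.List.pyRange a (-1) (-1) = a :: PySem.List.pyRange (a - 1) (-1) (-1) := by
  simp only [PySem.List.pyRange]
  norm_num
  have h1 : (-1 : Int) < a := by omega
  have h2 : (a + 1).toNat = a.toNat + 1 := by omega
  rw [if_pos h1, h2, List.range_succ_eq_map]
  by_cases h3 : 0 < a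
  · rw [if_pos h3]
    simp [List.map_map, Function.comp_def]
    intro k _
    ring
  · have : a = 0 := by omega
    subst this
    simp

lemma revLoop_aux (xs : List Char) : ∀ (n : Nat), n ≤ xs.length → ∀ acc,
    (PySem.List.pyRange ((n : Int) - 1) (-1) (-1)).foldl
      (fun ans i => ans ++ ((PySem.List.pyGet? xs i).map (fun c => [c])).getD []) acc
      = acc ++ (xs.take n).reverse := by
  intro n
  induction n with
  | zero =>
    intro _ acc
    simp
  | succ n ih =>
    intro h acc
    have hn : n < xs.length := by omega
    rw [show ((n + 1 : Nat) : Int) - 1 = ((n : Nat) : Int) from by push_cast; ring]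
    rw [pyRange_down_cons _ (by positivity)]
    simp only [List.foldl_cons, PySem.List.pyGet?_natCast]
    rw [ih (by omega)]
    simp only [List.getElem?_eq_getElem hn, Option.map_some, Option.getD_some]
    rw [List.take_add_one, List.getElem?_eq_getElem hn, List.reverse_append]
    simp

-- the reversal for-loop of A appends the reverse
lemma revLoop_eq (xs acc : List Char) :
    (PySem.List.pyRange ((xs.length : Int) - 1) (-1) (-1)).foldl
      (fun ans i => ans ++ ((PySem.List.pyGet? xs i).map (fun c => [c])).getD []) acc
      = acc ++ xs.reverse := by
  have := revLoop_aux xs xs.length (le_refl _) acc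
  simpa using this

-- ===== VERDICT (by name: the statement is the Claim_ definition above) =====
theorem solve_spec : Claim_equal_solve := by
  intro A _ hpre
  unfold Pre_solve at hpre
  obtain ⟨k, rfl, hk0⟩ : ∃ k : Nat, A = (k : Int) ∧ k ≠ 0 := ⟨A.toNat, by omega, by omega⟩
  unfold Spec_solve solve solve_alt
  have hx : solveLoopA (k : Int) [['1'], ['2']] [] 0 [] = hchars k := by
    have h := loopA_eq (k : Int) k 0 [['1'], ['2']] [] [] (by omega) (by
      simp [List.range', hchars_one, hchars_two])
    rw [if_neg hk0] at h
    simpa using h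
  simp only [hx, revLoop_eq, loopB_eq]
  simp
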